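-- pv_equiv track=rewrite | github.com/giovannirgn/frequent_patterns_static_and_stream | utils.py | encode_products
-- ===== SOURCE A (Python) =====
-- def encode_products(line, item_dict,item_id,C1):
--
--     basket = set()
--
--     for el in line.split("__")[2:]:
--
--         if el in item_dict:
--
--             basket.add(item_dict[el])
--             C1[item_dict[el]] += 1
--
--         else:
--
--             item_dict[el] = item_id
--             C1[item_id] = 1
--             basket.add(item_dict[el])
--             item_id += 1
--
--     return sorted(list(basket)), item_dict, item_id, C1
-- ===== SOURCE B (Python) =====
-- def encode_products(line, item_dict, item_id, C1):
--     # Staged pipeline instead of A's per-occurrence state machine: count the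
--     # items, bulk-assign ids to the new ones, then apply one C1 update per
--     # distinct item; mutates item_dict and C1 in place like A.
--     counts = {}
--     for el in line.split("__")[2:]:
--         counts[el] = counts.get(el, 0) + 1
--     new_items = [el for el in counts if el not in item_dict]
--     next_id = item_id
--     for el in new_items:
--         item_dict[el] = next_id
--         next_id += 1
--     fresh = set(new_items)
--     for el, c in counts.items():
--         ident = item_dict[el]
--         if el in fresh:
--             C1[ident] = c
--         else:
--             C1[ident] += c
--     basket = sorted({item_dict[el] for el in counts})
--     return basket, item_dict, next_id, C1
-- ===== Notes on version B (the rewrite author's own statement) =====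
-- stated objective: alternative
-- what changed: A runs one interleaved state machine over every item occurrence; B is a staged pipeline: count occurrences into a dict, list the new items and bulk-assign their ids with a separate counter loop, then apply exactly one C1 write per distinct item (assignment for new items, one += count for known ones) and build the basket from the final dict.
import Mathlib
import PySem

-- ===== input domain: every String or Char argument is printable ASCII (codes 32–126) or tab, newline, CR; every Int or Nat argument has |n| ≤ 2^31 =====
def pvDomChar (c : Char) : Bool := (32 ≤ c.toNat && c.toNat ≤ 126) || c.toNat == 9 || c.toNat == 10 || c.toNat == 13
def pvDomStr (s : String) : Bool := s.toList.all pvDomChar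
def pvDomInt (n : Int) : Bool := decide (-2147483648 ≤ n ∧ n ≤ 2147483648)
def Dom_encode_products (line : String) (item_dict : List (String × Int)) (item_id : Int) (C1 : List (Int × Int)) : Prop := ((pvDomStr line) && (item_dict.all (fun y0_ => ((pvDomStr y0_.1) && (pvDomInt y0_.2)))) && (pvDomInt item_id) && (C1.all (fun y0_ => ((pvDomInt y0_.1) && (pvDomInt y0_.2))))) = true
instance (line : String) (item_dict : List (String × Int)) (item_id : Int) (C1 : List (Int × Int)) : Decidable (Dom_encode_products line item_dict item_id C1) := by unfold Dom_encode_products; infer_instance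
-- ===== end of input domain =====

-- B replaces A's single interleaved per-occurrence state machine by a staged
-- pipeline (count occurrences, bulk-assign ids to the new items, one C1 write
-- per distinct item, basket from the final dict); in Python both A and B mutate
-- item_dict/C1 in place — the equivalence proved here is about the returned
-- 4-tuple (which contains both dicts).

-- shared helper: line.split("__")[2:]  (sep "__" ≠ "", so split? is always `some`)
def epItems (line : String) : List String :=
  PySem.List.slice ((PySem.Str.split? line "__").getD []) (some 2) none

-- loop state of A: (basket, item_dict, item_id, C1)
abbrev EPSt := PySem.Set Int × PySem.Dict String Int × Int × PySem.Dict Int Int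

-- ===== PORT A =====
-- body of A's for-loop, one occurrence at a time
def epStepA (s : EPSt) (el : String) : EPSt :=
  match s.2.1.get? el with
  | some v => (s.1.add v, s.2.1, s.2.2.1, s.2.2.2.modify v 0 (· + 1))   -- C1[item_dict[el]] += 1 (KeyError excluded by Pre_)
  | none   => (s.1.add s.2.2.1, s.2.1.insert el s.2.2.1, s.2.2.1 + 1, s.2.2.2.insert s.2.2.1 1)

def encode_products (line : String) (item_dict : List (String × Int)) (item_id : Int) (C1 : List (Int × Int)) : List Int × (List (String × Int)) × Int × (List (Int × Int)) :=
  let s := (epItems line).foldl epStepA ((PySem.Set.empty : PySem.Set Int), PySem.Dict.mk item_dict, item_id, PySem.Dict.mk C1)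
  (PySem.List.sorted s.1 (fun x => x), s.2.1.items, s.2.2.1, s.2.2.2.items)

-- ===== PORT B =====
-- counts[el] = counts.get(el, 0) + 1
def epCountStep (d : PySem.Dict String Int) (el : String) : PySem.Dict String Int :=
  d.insert el (d.getD el 0 + 1)

-- the id-assignment loop: for el in new_items: item_dict[el] = next_id; next_id += 1
def epAsg (s : PySem.Dict String Int × Int) (l : List String) : PySem.Dict String Int × Int :=
  l.foldl (fun s el => (s.1.insert el s.2, s.2 + 1)) s

-- body of B's C1-update loop, one (item, count) pair at a time
def epBStep (dF : PySem.Dict String Int) (fresh : PySem.Set String) (c : PySem.Dict Int Int) (p : String × Int) : PySem.Dict Int Int :=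
  if fresh.contains p.1 then c.insert (dF.getD p.1 0) p.2
  else c.modify (dF.getD p.1 0) 0 (· + p.2)   -- C1[ident] += c (KeyError excluded by Pre_)

def encode_products_alt (line : String) (item_dict : List (String × Int)) (item_id : Int) (C1 : List (Int × Int)) : List Int × (List (String × Int)) × Int × (List (Int × Int)) :=
  let counts := (epItems line).foldl epCountStep PySem.Dict.empty
  let newItems := counts.keys.filter (fun el => !((PySem.Dict.mk item_dict).contains el))
  let asg := epAsg (PySem.Dict.mk item_dict, item_id) newItems
  let fresh := PySem.Set.ofList newItems
  let c1 := counts.items.foldl (epBStep asg.1 fresh) (PySem.Dict.mk C1)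
  let basket := PySem.Set.ofList (counts.keys.map (fun el => asg.1.getD el 0))
  (PySem.List.sorted basket (fun x => x), asg.1.items, asg.2, c1.items)

-- ===== PRECONDITION & SPEC =====
-- number of distinct items of xs that are not yet keys of d (the ids this call will assign)
def epNewN (d : PySem.Dict String Int) (xs : List String) : Int :=
  ((((PySem.Set.ofList xs).filter (fun e => !(d.contains e))).length : Nat) : Int)

-- Pre_ requires a consistent encoder state: every id already assigned by item_dict to an
-- item of the line must be a key of C1 (otherwise A raises KeyError on `C1[...] += 1`),
-- and no such id may lie in the block of fresh ids [item_id, item_id + #new) that this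
-- call assigns — on such inconsistent state A's per-occurrence interleaving of the
-- overwrite `C1[item_id] = 1` with the increments is accidental.
def Pre_encode_products (line : String) (item_dict : List (String × Int)) (item_id : Int) (C1 : List (Int × Int)) : Prop :=
  ∀ el ∈ epItems line, ∀ v : Int, (PySem.Dict.mk item_dict).get? el = some v →
    v ∈ (PySem.Dict.mk C1).keys ∧
    (v < item_id ∨ item_id + epNewN (PySem.Dict.mk item_dict) (epItems line) ≤ v)
instance (line : String) (item_dict : List (String × Int)) (item_id : Int) (C1 : List (Int × Int)) : Decidable (Pre_encode_products line item_dict item_id C1) := by unfold Pre_encode_products; infer_instance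

def pvWitness_encode_products : String × (List (String × Int)) × Int × (List (Int × Int)) :=
  ("h1__h2__c__d__c", [("c", 0)], 1, [(0, 5)])

def Spec_encode_products (line : String) (item_dict : List (String × Int)) (item_id : Int) (C1 : List (Int × Int)) (out : List Int × (List (String × Int)) × Int × (List (Int × Int))) : Prop := out = encode_products_alt line item_dict item_id C1
instance (line : String) (item_dict : List (String × Int)) (item_id : Int) (C1 : List (Int × Int)) (out : List Int × (List (String × Int)) × Int × (List (Int × Int))) : Decidable (Spec_encode_products line item_dict item_id C1 out) := by unfold Spec_encode_products; infer_instance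

-- ===== CLAIM (what is proved, stated in full; the proofs are below) =====
def Claim_equal_encode_products : Prop := ∀ (line : String) (item_dict : List (String × Int)) (item_id : Int) (C1 : List (Int × Int)), Dom_encode_products line item_dict item_id C1 → Pre_encode_products line item_dict item_id C1 → Spec_encode_products line item_dict item_id C1 (encode_products line item_dict item_id C1)

-- ===== LEMMAS AND PROOFS =====

-- A's fold is first regrouped into a per-distinct-item fold epStepB (proof-side
-- intermediate), which is then shown equal to B's staged pipeline.
def epStepB (s : EPSt) (p : String × Int) : EPSt :=
  match s.2.1.get? p.1 with
  | some v => (s.1.add v, s.2.1, s.2.2.1, s.2.2.2.modify v 0 (· + p.2))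
  | none   => (s.1.add s.2.2.1, s.2.1.insert p.1 s.2.2.1, s.2.2.1 + 1, s.2.2.2.insert s.2.2.1 p.2)

-- states agree up to the (set-valued) basket's order
def epEq (s t : EPSt) : Prop := s.1.Perm t.1 ∧ s.2 = t.2

theorem epEq_refl (s : EPSt) : epEq s s := ⟨List.Perm.refl _, rfl⟩
theorem epEq_symm {s t : EPSt} (h : epEq s t) : epEq t s := ⟨h.1.symm, h.2.symm⟩
theorem epEq_trans {s t u : EPSt} (h1 : epEq s t) (h2 : epEq t u) : epEq s u :=
  ⟨h1.1.trans h2.1, h1.2.trans h2.2⟩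
theorem epEq_of_eq {s t : EPSt} (h : s = t) : epEq s t := h ▸ epEq_refl s

-- one later occurrence of an already-encoded item with id j
def epE (j : Int) (s : EPSt) : EPSt := (s.1.add j, s.2.1, s.2.2.1, s.2.2.2.modify j 0 (· + 1))

-- loop invariant carried through A's fold (epGood s xs = Pre_ re-read at state s)
def epGood (s : EPSt) (xs : List String) : Prop :=
  ∀ el ∈ xs, ∀ v : Int, s.2.1.get? el = some v →
    s.2.2.2.contains v = true ∧ (v < s.2.2.1 ∨ s.2.2.1 + epNewN s.2.1 xs ≤ v)

-- branch-reduction lemmas for the two step functions (modify written as insert, its definition)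
theorem epStepA_some {s : EPSt} {y : String} {v : Int} (h : s.2.1.get? y = some v) :
    epStepA s y = (s.1.add v, s.2.1, s.2.2.1, s.2.2.2.insert v (s.2.2.2.getD v 0 + 1)) := by
  unfold epStepA; rw [h]; rfl
theorem epStepA_none {s : EPSt} {y : String} (h : s.2.1.get? y = none) :
    epStepA s y = (s.1.add s.2.2.1, s.2.1.insert y s.2.2.1, s.2.2.1 + 1, s.2.2.2.insert s.2.2.1 1) := by
  unfold epStepA; rw [h]
theorem epStepB_some {s : EPSt} {y : String} {c v : Int} (h : s.2.1.get? y = some v) :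
    epStepB s (y, c) = (s.1.add v, s.2.1, s.2.2.1, s.2.2.2.insert v (s.2.2.2.getD v 0 + c)) := by
  have h' : s.2.1.get? ((y, c) : String × Int).1 = some v := h
  unfold epStepB; rw [h']; rfl
theorem epStepB_none {s : EPSt} {y : String} {c : Int} (h : s.2.1.get? y = none) :
    epStepB s (y, c) = (s.1.add s.2.2.1, s.2.1.insert y s.2.2.1, s.2.2.1 + 1, s.2.2.2.insert s.2.2.1 c) := by
  have h' : s.2.1.get? ((y, c) : String × Int).1 = none := h
  unfold epStepB; rw [h']
theorem epE_eq (j : Int) (s : EPSt) :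
    epE j s = (s.1.add j, s.2.1, s.2.2.1, s.2.2.2.insert j (s.2.2.2.getD j 0 + 1)) := rfl

theorem epSet_add_perm {s t : PySem.Set Int} (h : s.Perm t) (x : Int) :
    (s.add x).Perm (t.add x) := by
  by_cases hx : x ∈ s
  · rw [PySem.Set.add_of_mem hx, PySem.Set.add_of_mem (h.mem_iff.mp hx)]; exact h
  · rw [PySem.Set.add_of_not_mem hx, PySem.Set.add_of_not_mem (fun hc => hx (h.mem_iff.mpr hc))]
    exact h.append_right _

theorem epAdd_comm_perm (b : PySem.Set Int) (a c : Int) :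
    ((b.add a).add c).Perm ((b.add c).add a) := by
  by_cases hac : a = c
  · subst hac; exact List.Perm.refl _
  by_cases ha : a ∈ b <;> by_cases hc : c ∈ b
  · have e1 : (b.add a).add c = b := by
      rw [PySem.Set.add_of_mem ha, PySem.Set.add_of_mem hc]
    have e2 : (b.add c).add a = b := by
      rw [PySem.Set.add_of_mem hc, PySem.Set.add_of_mem ha]
    rw [e1, e2]
  · have e1 : (b.add a).add c = b ++ [c] := by
      rw [PySem.Set.add_of_mem ha, PySem.Set.add_of_not_mem hc]
    have e2 : (b.add c).add a = b ++ [c] := by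
      rw [PySem.Set.add_of_not_mem hc, PySem.Set.add_of_mem (List.mem_append_left _ ha)]
    rw [e1, e2]
  · have e1 : (b.add a).add c = b ++ [a] := by
      rw [PySem.Set.add_of_not_mem ha, PySem.Set.add_of_mem (List.mem_append_left _ hc)]
    have e2 : (b.add c).add a = b ++ [a] := by
      rw [PySem.Set.add_of_mem hc, PySem.Set.add_of_not_mem ha]
    rw [e1, e2]
  · have hna : a ∉ b ++ [c] := by
      intro hm
      rcases List.mem_append.mp hm with hm | hm
      · exact ha hm
      · exact hac (List.mem_singleton.mp hm)
    have hnc : c ∉ b ++ [a] := by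
      intro hm
      rcases List.mem_append.mp hm with hm | hm
      · exact hc hm
      · exact hac ((List.mem_singleton.mp hm).symm)
    have e1 : (b.add a).add c = b ++ [a] ++ [c] := by
      rw [PySem.Set.add_of_not_mem ha, PySem.Set.add_of_not_mem hnc]
    have e2 : (b.add c).add a = b ++ [c] ++ [a] := by
      rw [PySem.Set.add_of_not_mem hc, PySem.Set.add_of_not_mem hna]
    rw [e1, e2, List.append_assoc, List.append_assoc]
    exact List.Perm.append_left b (List.Perm.swap c a [])

theorem epStepA_congr {s t : EPSt} (h : epEq s t) (y : String) :
    epEq (epStepA s y) (epStepA t y) := by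
  obtain ⟨hb, h2⟩ := h
  have ht1 : t.2.1 = s.2.1 := by rw [h2]
  cases hg : s.2.1.get? y with
  | some v =>
      have hgt : t.2.1.get? y = some v := by rw [ht1]; exact hg
      rw [epStepA_some hg, epStepA_some hgt]
      exact ⟨epSet_add_perm hb v, by rw [h2]⟩
  | none =>
      have hgt : t.2.1.get? y = none := by rw [ht1]; exact hg
      have ht3 : t.2.2.1 = s.2.2.1 := by rw [h2]
      rw [epStepA_none hg, epStepA_none hgt]
      refine ⟨?_, by rw [h2]⟩
      show (s.1.add s.2.2.1).Perm (t.1.add t.2.2.1)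
      rw [ht3]
      exact epSet_add_perm hb _

theorem epFoldA_congr {s t : EPSt} (h : epEq s t) (xs : List String) :
    epEq (xs.foldl epStepA s) (xs.foldl epStepA t) := by
  induction xs generalizing s t with
  | nil => exact h
  | cons y ys ih => exact ih (epStepA_congr h y)

theorem epIns_comm {d : PySem.Dict Int Int} {j k : Int} (hne : k ≠ j)
    (hj : d.contains j = true) (a b : Int) :
    (d.insert j a).insert k b = (d.insert k b).insert j a := by
  apply PySem.Dict.ext
  have hcontj : (d.insert k b).contains j = true := by
    rw [PySem.Dict.contains_insert, hj, Bool.or_true]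
  by_cases hck : d.contains k = true
  · have h1 : (d.insert j a).contains k = true := by
      rw [PySem.Dict.contains_insert, hck, Bool.or_true]
    rw [PySem.Dict.items_insert (d.insert j a) k b, if_pos h1,
        PySem.Dict.items_insert d j a, if_pos hj,
        PySem.Dict.items_insert (d.insert k b) j a, if_pos hcontj,
        PySem.Dict.items_insert d k b, if_pos hck,
        List.map_map, List.map_map]
    apply List.map_congr_left
    intro p _
    by_cases hpj : p.1 = j <;> by_cases hpk : p.1 = k <;>
      simp [Function.comp, hpj, hpk, hne, Ne.symm hne]
  · have hckf : d.contains k = false := eq_false_of_ne_true hck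
    have h1 : ¬ (d.insert j a).contains k = true := by
      rw [PySem.Dict.contains_insert]
      simp [hckf, hne]
    rw [PySem.Dict.items_insert (d.insert j a) k b, if_neg h1,
        PySem.Dict.items_insert d j a, if_pos hj,
        PySem.Dict.items_insert (d.insert k b) j a, if_pos hcontj,
        PySem.Dict.items_insert d k b, if_neg (by simp [hckf]),
        List.map_append]
    have : ((k, b) : Int × Int).1 ≠ j := hne
    simp [this]

theorem epComm (y : String) (s : EPSt) (j : Int) (hk : s.2.2.2.contains j = true)
    (hid : s.2.1.get? y = none → j ≠ s.2.2.1) :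
    epEq (epStepA (epE j s) y) (epE j (epStepA s y)) := by
  cases h : s.2.1.get? y with
  | some v =>
      have hL : epStepA (epE j s) y
          = ((s.1.add j).add v, s.2.1, s.2.2.1,
             (s.2.2.2.insert j (s.2.2.2.getD j 0 + 1)).insert v
               ((s.2.2.2.insert j (s.2.2.2.getD j 0 + 1)).getD v 0 + 1)) :=
        epStepA_some (s := epE j s) h
      have hR : epE j (epStepA s y)
          = ((s.1.add v).add j, s.2.1, s.2.2.1,
             (s.2.2.2.insert v (s.2.2.2.getD v 0 + 1)).insert j
               ((s.2.2.2.insert v (s.2.2.2.getD v 0 + 1)).getD j 0 + 1)) := by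
        rw [epStepA_some h]; rfl
      by_cases hvj : v = j
      · subst hvj
        exact epEq_of_eq (by rw [hL, hR])
      · rw [hL, hR]
        refine ⟨epAdd_comm_perm s.1 j v, ?_⟩
        rw [PySem.Dict.getD_insert, if_neg hvj,
            PySem.Dict.getD_insert, if_neg (fun hh => hvj hh.symm)]
        rw [epIns_comm hvj hk]
  | none =>
      have hji : j ≠ s.2.2.1 := hid h
      have hL : epStepA (epE j s) y
          = ((s.1.add j).add s.2.2.1, s.2.1.insert y s.2.2.1, s.2.2.1 + 1,
             (s.2.2.2.insert j (s.2.2.2.getD j 0 + 1)).insert s.2.2.1 1) :=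
        epStepA_none (s := epE j s) h
      have hR : epE j (epStepA s y)
          = ((s.1.add s.2.2.1).add j, s.2.1.insert y s.2.2.1, s.2.2.1 + 1,
             (s.2.2.2.insert s.2.2.1 1).insert j
               ((s.2.2.2.insert s.2.2.1 1).getD j 0 + 1)) := by
        rw [epStepA_none h]; rfl
      rw [hL, hR]
      refine ⟨epAdd_comm_perm s.1 j s.2.2.1, ?_⟩
      rw [PySem.Dict.getD_insert, if_neg hji]
      rw [epIns_comm (Ne.symm hji) hk]

theorem epE_congr {s t : EPSt} (h : epEq s t) (j : Int) : epEq (epE j s) (epE j t) := by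
  obtain ⟨hb, h2⟩ := h
  exact ⟨epSet_add_perm hb j, by unfold epE; rw [h2]⟩

theorem epE_iter_congr {s t : EPSt} (h : epEq s t) (j : Int) (c : Nat) :
    epEq ((epE j)^[c] s) ((epE j)^[c] t) := by
  induction c generalizing s t with
  | zero => exact h
  | succ c ih =>
      rw [Function.iterate_succ_apply, Function.iterate_succ_apply]
      exact ih (epE_congr h j)

theorem epE_contains {s : EPSt} {j : Int} (h : s.2.2.2.contains j = true) (i : Int) :
    (epE i s).2.2.2.contains j = true := by
  show (s.2.2.2.modify i 0 (· + 1)).contains j = true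
  rw [PySem.Dict.contains_modify, h, Bool.or_true]

theorem epCommPow (c : Nat) (y : String) (s : EPSt) (j : Int)
    (hc : s.2.2.2.contains j = true) (hid : s.2.1.get? y = none → j ≠ s.2.2.1) :
    epEq (epStepA ((epE j)^[c] s) y) ((epE j)^[c] (epStepA s y)) := by
  induction c generalizing s with
  | zero => exact epEq_refl _
  | succ c ih =>
      rw [Function.iterate_succ_apply, Function.iterate_succ_apply]
      exact epEq_trans (ih (epE j s) (epE_contains hc j) hid)
        (epE_iter_congr (epComm y s j hc hid) j c)

theorem epE_iter_insert (j : Int) (b : PySem.Set Int) (d : PySem.Dict String Int)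
    (i2 : Int) (c1 : PySem.Dict Int Int) (a : Int) (m : Nat) :
    (epE j)^[m] (b.add j, d, i2, c1.insert j a) = (b.add j, d, i2, c1.insert j (a + m)) := by
  induction m generalizing a with
  | zero => simp
  | succ m ih =>
      have hmem : j ∈ b.add j := by rw [PySem.Set.mem_add]; exact Or.inr rfl
      have hE : epE j ((b.add j, d, i2, c1.insert j a) : EPSt)
          = ((b.add j).add j, d, i2,
             (c1.insert j a).insert j ((c1.insert j a).getD j 0 + 1)) := epE_eq j _
      rw [PySem.Set.add_of_mem hmem, PySem.Dict.getD_insert_self,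
          PySem.Dict.insert_insert_self] at hE
      rw [Function.iterate_succ_apply, hE, ih (a + 1)]
      exact congrArg (fun z => ((b.add j, d, i2, c1.insert j z) : EPSt)) (by push_cast; ring)

theorem epE_iter_succ (j : Int) (s : EPSt) (n : Nat) :
    (epE j)^[n + 1] s
    = (s.1.add j, s.2.1, s.2.2.1, s.2.2.2.insert j (s.2.2.2.getD j 0 + ((n : Int) + 1))) := by
  rw [Function.iterate_succ_apply, epE_eq,
      epE_iter_insert j s.1 s.2.1 s.2.2.1 s.2.2.2 (s.2.2.2.getD j 0 + 1) n]
  exact congrArg (fun z => ((s.1.add j, s.2.1, s.2.2.1, s.2.2.2.insert j z) : EPSt)) (by ring)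

-- ---- counting distinct new items ----

theorem epDiscard_eq {α : Type} [BEq α] (s : PySem.Set α) (x : α) :
    s.discard x = s.filter (fun z => !(z == x)) := rfl

theorem epOfList_filter (p : String → Bool) (xs : List String) :
    PySem.Set.ofList (xs.filter p) = (PySem.Set.ofList xs).filter p := by
  induction xs with
  | nil => rfl
  | cons y ys ih =>
      rw [PySem.Set.ofList_cons]
      by_cases hy : p y = true
      · rw [List.filter_cons_of_pos hy, PySem.Set.ofList_cons, ih, List.filter_cons_of_pos hy,
            epDiscard_eq, epDiscard_eq, List.filter_filter, List.filter_filter]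
        have : ∀ z ∈ (PySem.Set.ofList ys : List String),
            (p z && !(z == y)) = (!(z == y) && p z) := fun z _ => Bool.and_comm _ _
        rw [List.filter_congr this]
      · have hy' : p y = false := Bool.eq_false_iff.mpr hy
        rw [List.filter_cons_of_neg (by rw [hy']; exact Bool.false_ne_true), ih,
            List.filter_cons_of_neg (by rw [hy']; exact Bool.false_ne_true),
            epDiscard_eq, List.filter_filter]
        refine (List.filter_congr ?_).symm
        intro z _
        by_cases hzy : z = y
        · subst hzy
          rw [hy']
          simp
        · have : (z == y) = false := beq_eq_false_iff_ne.mpr hzy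
          rw [this]
          simp

theorem epOfList_length (l : List String) : (PySem.Set.ofList l).length = l.toFinset.card := by
  rw [List.card_toFinset]
  refine List.Perm.length_eq ?_
  rw [List.perm_ext_iff_of_nodup (PySem.Set.nodup_ofList l) l.nodup_dedup]
  intro a
  rw [PySem.Set.mem_ofList, List.mem_dedup]

theorem epN_card (d : PySem.Dict String Int) (xs : List String) :
    epNewN d xs = (((xs.filter (fun e => !(d.contains e))).toFinset.card : Nat) : Int) := by
  unfold epNewN
  rw [← epOfList_filter, epOfList_length]

theorem epN_sublist (d : PySem.Dict String Int) {l1 l2 : List String} (h : l1.Sublist l2) :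
    epNewN d l1 ≤ epNewN d l2 := by
  rw [epN_card, epN_card]
  have hsub : (l1.filter (fun e => !(d.contains e))).toFinset
      ⊆ (l2.filter (fun e => !(d.contains e))).toFinset := by
    intro z hz
    rw [List.mem_toFinset, List.mem_filter] at hz ⊢
    exact ⟨h.subset hz.1, hz.2⟩
  exact_mod_cast Finset.card_le_card hsub

theorem epN_pos (d : PySem.Dict String Int) (xs : List String) (y : String)
    (hy : y ∈ xs) (hc : d.contains y = false) : 1 ≤ epNewN d xs := by
  rw [epN_card]
  have hmem : y ∈ (xs.filter (fun e => !(d.contains e))).toFinset := by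
    rw [List.mem_toFinset, List.mem_filter, hc]
    exact ⟨hy, rfl⟩
  exact_mod_cast Finset.card_pos.mpr ⟨y, hmem⟩

theorem epN_insert (d : PySem.Dict String Int) (y : String) (v : Int)
    (hy : d.contains y = false) (ys : List String) :
    epNewN (d.insert y v) ys = epNewN d (y :: ys) - 1 := by
  rw [epN_card, epN_card]
  have hset : (ys.filter (fun e => !((d.insert y v).contains e))).toFinset
      = (((y :: ys).filter (fun e => !(d.contains e))).toFinset).erase y := by
    ext z
    rw [Finset.mem_erase, List.mem_toFinset, List.mem_toFinset, List.mem_filter,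
        List.mem_filter, List.mem_cons]
    constructor
    · rintro ⟨hz1, hz2⟩
      rw [PySem.Dict.contains_insert] at hz2
      have hz3 : (z == y) = false ∧ d.contains z = false := by
        constructor
        · cases hzy : (z == y) with
          | false => rfl
          | true => rw [hzy, Bool.true_or] at hz2; exact absurd hz2 (by decide)
        · cases hzc : d.contains z with
          | false => rfl
          | true => rw [hzc, Bool.or_true] at hz2; exact absurd hz2 (by decide)
      refine ⟨fun hh => ?_, Or.inr hz1, by rw [hz3.2]; rfl⟩
      rw [beq_eq_false_iff_ne] at hz3
      exact hz3.1 hh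
    · rintro ⟨hzy, hz | hz, hzc⟩
      · exact absurd hz hzy
      · refine ⟨hz, ?_⟩
        rw [PySem.Dict.contains_insert, beq_eq_false_iff_ne.mpr hzy]
        rw [Bool.not_eq_true'] at hzc ⊢
        rw [hzc]
        rfl
  rw [hset]
  have hymem : y ∈ ((y :: ys).filter (fun e => !(d.contains e))).toFinset := by
    rw [List.mem_toFinset, List.mem_filter, List.mem_cons, hy]
    exact ⟨Or.inl rfl, rfl⟩
  rw [Finset.card_erase_of_mem hymem]
  have hpos : 1 ≤ (((y :: ys).filter (fun e => !(d.contains e))).toFinset).card :=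
    Finset.card_pos.mpr ⟨y, hymem⟩
  omega

-- ---- pulling all occurrences of one item onto its first occurrence ----

theorem epPull (x : String) : ∀ (xs : List String) (s : EPSt) (j : Int),
    s.2.1.get? x = some j → s.2.2.2.contains j = true →
    (j < s.2.2.1 ∨ s.2.2.1 + epNewN s.2.1 xs ≤ j) →
    epEq (xs.foldl epStepA s)
      ((xs.filter (fun y => !(y == x))).foldl epStepA ((epE j)^[xs.count x] s)) := by
  intro xs
  induction xs with
  | nil => intro s j _ _ _; exact epEq_refl _
  | cons y ys ih =>
      intro s j hx hc hw
      by_cases hyx : y = x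
      · subst hyx
        have hstep : epStepA s y = epE j s := by
          rw [epStepA_some hx, epE_eq]
        rw [List.foldl_cons, hstep, List.filter_cons_of_neg (by simp),
            List.count_cons_self, Function.iterate_succ_apply]
        refine ih (epE j s) j hx (epE_contains hc j) ?_
        have hmono := epN_sublist s.2.1 (List.sublist_cons_self y ys)
        show j < s.2.2.1 ∨ s.2.2.1 + epNewN s.2.1 ys ≤ j
        omega
      · have hxy : x ≠ y := fun hh => hyx hh.symm
        have hcount : (y :: ys).count x = ys.count x := by
          simp [hyx]
        rw [List.foldl_cons, List.filter_cons_of_pos (by simp [hyx]),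
            List.foldl_cons, hcount]
        cases hy : s.2.1.get? y with
        | some v =>
            have h1 : (epStepA s y).2.1.get? x = some j := by
              rw [epStepA_some hy]; exact hx
            have h2 : (epStepA s y).2.2.2.contains j = true := by
              rw [epStepA_some hy]
              show (s.2.2.2.insert v _).contains j = true
              rw [PySem.Dict.contains_insert, hc, Bool.or_true]
            have h3 : (j < (epStepA s y).2.2.1 ∨
                (epStepA s y).2.2.1 + epNewN (epStepA s y).2.1 ys ≤ j) := by
              rw [epStepA_some hy]
              show j < s.2.2.1 ∨ s.2.2.1 + epNewN s.2.1 ys ≤ j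
              have hmono := epN_sublist s.2.1 (List.sublist_cons_self y ys)
              omega
            refine epEq_trans (ih (epStepA s y) j h1 h2 h3) ?_
            exact epFoldA_congr
              (epEq_symm (epCommPow (ys.count x) y s j hc
                (fun hh => absurd (hh ▸ hy : (none : Option Int) = some v) (by simp)))) _
        | none =>
            have hnew : s.2.1.contains y = false := by
              rw [PySem.Dict.contains_eq_isSome_get?, hy]; rfl
            have hNpos : 1 ≤ epNewN s.2.1 (y :: ys) :=
              epN_pos s.2.1 (y :: ys) y List.mem_cons_self hnew
            have hji : j ≠ s.2.2.1 := by omega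
            have h1 : (epStepA s y).2.1.get? x = some j := by
              rw [epStepA_none hy]
              show (s.2.1.insert y s.2.2.1).get? x = some j
              rw [PySem.Dict.get?_insert, if_neg hxy]
              exact hx
            have h2 : (epStepA s y).2.2.2.contains j = true := by
              rw [epStepA_none hy]
              show (s.2.2.2.insert s.2.2.1 1).contains j = true
              rw [PySem.Dict.contains_insert, hc, Bool.or_true]
            have h3 : (j < (epStepA s y).2.2.1 ∨
                (epStepA s y).2.2.1 + epNewN (epStepA s y).2.1 ys ≤ j) := by
              rw [epStepA_none hy]
              show j < s.2.2.1 + 1 ∨ (s.2.2.1 + 1) + epNewN (s.2.1.insert y s.2.2.1) ys ≤ j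
              have hins := epN_insert s.2.1 y s.2.2.1 hnew ys
              omega
            refine epEq_trans (ih (epStepA s y) j h1 h2 h3) ?_
            exact epFoldA_congr (epEq_symm (epCommPow (ys.count x) y s j hc (fun _ => hji))) _

-- ---- main grouping lemma: per-occurrence fold = per-distinct-item fold ----

theorem epMain : ∀ (n : Nat) (xs : List String), xs.length ≤ n → ∀ s : EPSt, epGood s xs →
    epEq (xs.foldl epStepA s)
      (((PySem.Set.ofList xs).map (fun k => (k, (xs.count k : Int)))).foldl epStepB s) := by
  intro n
  induction n with
  | zero =>
      intro xs hlen s _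
      rw [List.length_eq_zero_iff.mp (Nat.le_zero.mp hlen)]
      exact epEq_refl _
  | succ n ih =>
      intro xs hlen s hgood
      cases xs with
      | nil => exact epEq_refl _
      | cons x ys =>
          have hfil : (PySem.Set.ofList ys).discard x
              = PySem.Set.ofList (ys.filter (fun y => !(y == x))) := by
            rw [epOfList_filter, epDiscard_eq]
          have hcong : ((PySem.Set.ofList ys).discard x).map
                (fun k => (k, ((x :: ys).count k : Int)))
              = (PySem.Set.ofList (ys.filter (fun y => !(y == x)))).map
                (fun k => (k, ((ys.filter (fun y => !(y == x))).count k : Int))) := by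
            rw [hfil]
            refine List.map_congr_left ?_
            intro k hk
            rw [PySem.Set.mem_ofList, List.mem_filter] at hk
            have hkx : k ≠ x := by
              have := hk.2
              rw [Bool.not_eq_true', beq_eq_false_iff_ne] at this
              exact this
            have hkx' : ¬ x = k := fun hh => hkx hh.symm
            have hc1 : (x :: ys).count k = ys.count k := by
              simp [hkx']
            have hc2 : (ys.filter (fun y => !(y == x))).count k = ys.count k :=
              List.count_filter (by simp [hkx])
            rw [hc1, hc2]
          have hlen2 : (ys.filter (fun y => !(y == x))).length ≤ n :=
            le_trans (List.length_filter_le _ _) (Nat.le_of_succ_le_succ hlen)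
          rw [PySem.Set.ofList_cons, List.map_cons, List.foldl_cons, List.foldl_cons, hcong]
          cases hx : s.2.1.get? x with
          | some j =>
              obtain ⟨hcj, hwj⟩ := hgood x List.mem_cons_self j hx
              have hstep : epStepA s x = epE j s := by rw [epStepA_some hx, epE_eq]
              have hpull := epPull x ys (epE j s) j hx (epE_contains hcj j)
                (by show j < s.2.2.1 ∨ s.2.2.1 + epNewN s.2.1 ys ≤ j
                    have hmono := epN_sublist s.2.1 (List.sublist_cons_self x ys)
                    omega)
              rw [hstep]
              refine epEq_trans hpull ?_
              have hstate : (epE j)^[ys.count x] (epE j s)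
                  = epStepB s (x, ((x :: ys).count x : Int)) := by
                rw [← Function.iterate_succ_apply, epE_iter_succ j s (ys.count x),
                    epStepB_some hx, List.count_cons_self]
                exact congrArg
                  (fun z => ((s.1.add j, s.2.1, s.2.2.1,
                    s.2.2.2.insert j (s.2.2.2.getD j 0 + z)) : EPSt))
                  (by push_cast; ring)
              rw [hstate]
              refine ih _ hlen2 _ ?_
              intro el hel v hv
              rw [epStepB_some hx] at hv ⊢
              have hv' : s.2.1.get? el = some v := hv
              obtain ⟨hgc, hgw⟩ := hgood el
                (List.mem_cons_of_mem x (List.mem_filter.mp hel).1) v hv'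
              constructor
              · show (s.2.2.2.insert j _).contains v = true
                rw [PySem.Dict.contains_insert, hgc, Bool.or_true]
              · show v < s.2.2.1 ∨ s.2.2.1 + epNewN s.2.1 (ys.filter (fun y => !(y == x))) ≤ v
                have hsub := epN_sublist s.2.1
                  ((List.filter_sublist :
                    (ys.filter (fun y => !(y == x))).Sublist ys).trans
                    (List.sublist_cons_self x ys))
                omega
          | none =>
              have hnew : s.2.1.contains x = false := by
                rw [PySem.Dict.contains_eq_isSome_get?, hx]; rfl
              rw [epStepA_none hx]
              have hpull := epPull x ys
                ((s.1.add s.2.2.1, s.2.1.insert x s.2.2.1, s.2.2.1 + 1,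
                  s.2.2.2.insert s.2.2.1 1) : EPSt) s.2.2.1
                (PySem.Dict.get?_insert_self s.2.1 x s.2.2.1)
                (PySem.Dict.contains_insert_self s.2.2.2 s.2.2.1 1)
                (Or.inl (by show s.2.2.1 < s.2.2.1 + 1; omega))
              refine epEq_trans hpull ?_
              have hstate : (epE s.2.2.1)^[ys.count x]
                  ((s.1.add s.2.2.1, s.2.1.insert x s.2.2.1, s.2.2.1 + 1,
                    s.2.2.2.insert s.2.2.1 1) : EPSt)
                  = epStepB s (x, ((x :: ys).count x : Int)) := by
                rw [epE_iter_insert, epStepB_none hx, List.count_cons_self]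
                exact congrArg
                  (fun z => ((s.1.add s.2.2.1, s.2.1.insert x s.2.2.1, s.2.2.1 + 1,
                    s.2.2.2.insert s.2.2.1 z) : EPSt))
                  (by push_cast; ring)
              rw [hstate]
              refine ih _ hlen2 _ ?_
              intro el hel v hv
              rw [epStepB_none hx] at hv ⊢
              have helx : el ≠ x := by
                have := (List.mem_filter.mp hel).2
                rw [Bool.not_eq_true', beq_eq_false_iff_ne] at this
                exact this
              have hv' : s.2.1.get? el = some v := by
                have hv2 : (s.2.1.insert x s.2.2.1).get? el = some v := hv
                rwa [PySem.Dict.get?_insert, if_neg helx] at hv2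
              obtain ⟨hgc, hgw⟩ := hgood el
                (List.mem_cons_of_mem x (List.mem_filter.mp hel).1) v hv'
              constructor
              · show (s.2.2.2.insert s.2.2.1 _).contains v = true
                rw [PySem.Dict.contains_insert, hgc, Bool.or_true]
              · show v < s.2.2.1 + 1 ∨
                  (s.2.2.1 + 1) + epNewN (s.2.1.insert x s.2.2.1) (ys.filter (fun y => !(y == x))) ≤ v
                have hins := epN_insert s.2.1 x s.2.2.1 hnew (ys.filter (fun y => !(y == x)))
                have hsub : epNewN s.2.1 (x :: ys.filter (fun y => !(y == x)))
                    ≤ epNewN s.2.1 (x :: ys) :=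
                  epN_sublist s.2.1 (List.Sublist.cons₂ x
                    (List.filter_sublist : (ys.filter (fun y => !(y == x))).Sublist ys))
                omega

-- ---- the per-distinct-item fold equals B's staged pipeline ----

-- the new items of a (item, count) list w.r.t. a dict
def epNewL (d : PySem.Dict String Int) (L : List (String × Int)) : List String :=
  (L.map Prod.fst).filter (fun el => !(d.contains el))

theorem epAsg_cons (s : PySem.Dict String Int × Int) (el : String) (l : List String) :
    epAsg s (el :: l) = epAsg (s.1.insert el s.2, s.2 + 1) l := rfl

theorem epAsg_get?_not_mem : ∀ (l : List String) (d : PySem.Dict String Int) (i : Int)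
    {x : String}, x ∉ l → (epAsg (d, i) l).1.get? x = d.get? x := by
  intro l
  induction l with
  | nil => intro d i x _; rfl
  | cons y ys ih =>
      intro d i x hx
      rw [epAsg_cons]
      have hxy : x ≠ y := fun hh => hx (hh ▸ List.mem_cons_self)
      rw [ih _ _ (fun hh => hx (List.mem_cons_of_mem _ hh)),
          PySem.Dict.get?_insert_of_ne _ _ hxy]

theorem epAsg_getD_head {x : String} {l : List String} (hx : x ∉ l)
    (d : PySem.Dict String Int) (i : Int) : (epAsg (d, i) (x :: l)).1.getD x 0 = i := by
  rw [epAsg_cons]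
  exact PySem.Dict.getD_of_get?_eq_some _ _
    (by rw [epAsg_get?_not_mem l _ _ hx]; exact PySem.Dict.get?_insert_self d x i)

theorem epBStep_fresh {dF : PySem.Dict String Int} {fresh : PySem.Set String}
    {p : String × Int} (h : fresh.contains p.1 = true) (c : PySem.Dict Int Int) :
    epBStep dF fresh c p = c.insert (dF.getD p.1 0) p.2 := by
  unfold epBStep; rw [h]; rfl

theorem epBStep_stale {dF : PySem.Dict String Int} {fresh : PySem.Set String}
    {p : String × Int} (h : fresh.contains p.1 = false) (c : PySem.Dict Int Int) :
    epBStep dF fresh c p = c.insert (dF.getD p.1 0) (c.getD (dF.getD p.1 0) 0 + p.2) := by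
  unfold epBStep; rw [h]; rfl

theorem epBridge : ∀ (L : List (String × Int)), (L.map Prod.fst).Nodup →
    ∀ (b : PySem.Set Int) (d : PySem.Dict String Int) (i : Int) (c1 : PySem.Dict Int Int),
    L.foldl epStepB (b, d, i, c1) =
      (L.foldl (fun bb p => bb.add ((epAsg (d, i) (epNewL d L)).1.getD p.1 0)) b,
       (epAsg (d, i) (epNewL d L)).1,
       (epAsg (d, i) (epNewL d L)).2,
       L.foldl (epBStep (epAsg (d, i) (epNewL d L)).1 (PySem.Set.ofList (epNewL d L))) c1) := by
  intro L
  induction L with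
  | nil => intro _ b d i c1; rfl
  | cons p T ih =>
      intro hnd b d i c1
      have hnd' : p.1 ∉ T.map Prod.fst ∧ (T.map Prod.fst).Nodup := by
        rw [List.map_cons] at hnd
        exact List.nodup_cons.mp hnd
      have hp : p.1 ∉ T.map Prod.fst := hnd'.1
      have hT : (T.map Prod.fst).Nodup := hnd'.2
      cases hc : d.contains p.1 with
      | true =>
          obtain ⟨v, hv⟩ : ∃ v, d.get? p.1 = some v := by
            rw [PySem.Dict.contains_eq_isSome_get?] at hc
            exact Option.isSome_iff_exists.mp hc
          have hNL : epNewL d (p :: T) = epNewL d T := by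
            unfold epNewL
            rw [List.map_cons, List.filter_cons_of_neg (by rw [hc]; decide)]
          have hnotin : p.1 ∉ epNewL d T := by
            intro hmem
            have := (List.mem_filter.mp hmem).2
            rw [hc] at this
            exact absurd this (by decide)
          have hgetD : (epAsg (d, i) (epNewL d T)).1.getD p.1 0 = v :=
            PySem.Dict.getD_of_get?_eq_some _ _
              (by rw [epAsg_get?_not_mem _ _ _ hnotin]; exact hv)
          have hfr : (PySem.Set.ofList (epNewL d T)).contains p.1 = false := by
            rw [Bool.eq_false_iff]
            intro hh
            exact hnotin ((PySem.Set.mem_ofList _ _).mp ((PySem.Set.contains_iff _ _).mp hh))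
          have hstep : epStepB (b, d, i, c1) p
              = (b.add v, d, i, c1.insert v (c1.getD v 0 + p.2)) := by
            have := epStepB_some (s := ((b, d, i, c1) : EPSt)) (y := p.1) (c := p.2) hv
            simpa using this
          rw [List.foldl_cons, List.foldl_cons, List.foldl_cons, hNL, hstep,
              ih hT (b.add v) d i (c1.insert v (c1.getD v 0 + p.2)), hgetD,
              epBStep_stale hfr, hgetD]
      | false =>
          have hv : d.get? p.1 = none := by
            rw [PySem.Dict.get?_eq_none_iff_contains]
            exact hc
          have hNL : epNewL d (p :: T) = p.1 :: epNewL d T := by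
            unfold epNewL
            rw [List.map_cons, List.filter_cons_of_pos (by rw [hc]; decide)]
          have hNL' : epNewL (d.insert p.1 i) T = epNewL d T := by
            unfold epNewL
            refine List.filter_congr ?_
            intro x hx
            have hxp : x ≠ p.1 := fun hh => hp (hh ▸ hx)
            rw [PySem.Dict.contains_insert, beq_eq_false_iff_ne.mpr hxp, Bool.false_or]
          have hsub : p.1 ∉ epNewL d T := by
            intro hmem
            exact hp ((List.mem_filter.mp hmem).1)
          have hstep : epStepB (b, d, i, c1) p
              = (b.add i, d.insert p.1 i, i + 1, c1.insert i p.2) := by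
            have := epStepB_none (s := ((b, d, i, c1) : EPSt)) (y := p.1) (c := p.2) hv
            simpa using this
          have hA : epAsg (d, i) (epNewL d (p :: T))
              = epAsg (d.insert p.1 i, i + 1) (epNewL (d.insert p.1 i) T) := by
            rw [hNL, hNL']
            exact epAsg_cons (d, i) p.1 (epNewL d T)
          have hgetD : (epAsg (d, i) (epNewL d (p :: T))).1.getD p.1 0 = i := by
            rw [hNL]
            exact epAsg_getD_head hsub d i
          have hfr1 : (PySem.Set.ofList (epNewL d (p :: T))).contains p.1 = true := by
            refine (PySem.Set.contains_iff _ _).mpr ?_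
            rw [PySem.Set.mem_ofList, hNL]
            exact List.mem_cons_self
          rw [List.foldl_cons, List.foldl_cons, List.foldl_cons, hstep,
              ih hT (b.add i) (d.insert p.1 i) (i + 1) (c1.insert i p.2),
              epBStep_fresh hfr1, hgetD, hA]
          refine congrArg (fun z => (_, _, _, z) : PySem.Dict Int Int →
            PySem.Set Int × PySem.Dict String Int × Int × PySem.Dict Int Int) ?_
          refine PySem.List.foldl_congr_mem T _ _ _ ?_
          intro cc q hq
          have hqp : q.1 ≠ p.1 := fun hh => hp (hh ▸ List.mem_map_of_mem hq)
          have hfr : (PySem.Set.ofList (epNewL (d.insert p.1 i) T)).contains q.1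
              = (PySem.Set.ofList (epNewL d (p :: T))).contains q.1 := by
            rw [Bool.eq_iff_iff, PySem.Set.contains_iff, PySem.Set.contains_iff,
                PySem.Set.mem_ofList, PySem.Set.mem_ofList, hNL, hNL', List.mem_cons]
            exact ⟨Or.inr, fun h => h.resolve_left hqp⟩
          unfold epBStep
          rw [hfr]

-- ---- reassembly ----

-- the per-distinct-item list A's fold is regrouped into
def epL (line : String) : List (String × Int) :=
  (PySem.Set.ofList (epItems line)).map (fun k => (k, ((epItems line).count k : Int)))

theorem epL_fst (line : String) : (epL line).map Prod.fst = PySem.Set.ofList (epItems line) := by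
  unfold epL
  rw [List.map_map]
  exact List.map_id _

theorem epNodupB (l : List (String × Int)) : ∀ (s : EPSt), s.1.Nodup →
    ((l.foldl epStepB s)).1.Nodup := by
  induction l with
  | nil => intro s h; exact h
  | cons p ps ih =>
      intro s h
      rw [List.foldl_cons]
      refine ih _ ?_
      cases hg : s.2.1.get? p.1 with
      | some v =>
          rw [show epStepB s p = epStepB s (p.1, p.2) from rfl, epStepB_some hg]
          exact PySem.Set.nodup_add _ _ h
      | none =>
          rw [show epStepB s p = epStepB s (p.1, p.2) from rfl, epStepB_none hg]
          exact PySem.Set.nodup_add _ _ h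

theorem epSorted_eq {xs ys : List Int} (hperm : xs.Perm ys) (hnd : ys.Nodup) :
    PySem.List.sorted xs (fun x => x) = PySem.List.sorted ys (fun x => x) := by
  have h1 : (PySem.List.sorted ys (fun x => x)).Perm ys := PySem.List.sorted_perm ys _ false
  have hnd' : (PySem.List.sorted ys (fun x => x)).Nodup := h1.nodup_iff.mpr hnd
  have hle : (PySem.List.sorted ys (fun x => x)).Pairwise (fun a b => a ≤ b) :=
    PySem.List.sorted_pairwise ys (fun x => x)
  have hlt : (PySem.List.sorted ys (fun x => x)).Pairwise (fun a b => a < b) :=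
    (hle.and hnd').imp (fun h => lt_of_le_of_ne h.1 h.2)
  exact PySem.List.sorted_eq_of_perm_of_pairwise_lt xs _ _ (h1.trans hperm.symm) hlt

-- value of A's port as an explicit expression (holds by definition)
theorem epA_eq (line : String) (item_dict : List (String × Int)) (item_id : Int) (C1 : List (Int × Int)) :
    encode_products line item_dict item_id C1
    = (PySem.List.sorted ((epItems line).foldl epStepA
        ((PySem.Set.empty : PySem.Set Int), PySem.Dict.mk item_dict, item_id, PySem.Dict.mk C1)).1 (fun x => x),
       ((epItems line).foldl epStepA
        ((PySem.Set.empty : PySem.Set Int), PySem.Dict.mk item_dict, item_id, PySem.Dict.mk C1)).2.1.items,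
       ((epItems line).foldl epStepA
        ((PySem.Set.empty : PySem.Set Int), PySem.Dict.mk item_dict, item_id, PySem.Dict.mk C1)).2.2.1,
       ((epItems line).foldl epStepA
        ((PySem.Set.empty : PySem.Set Int), PySem.Dict.mk item_dict, item_id, PySem.Dict.mk C1)).2.2.2.items) := rfl

-- B's staged pipeline equals the projections of the per-distinct-item fold
set_option maxHeartbeats 2000000 in
theorem epB_canon (line : String) (item_dict : List (String × Int)) (item_id : Int) (C1 : List (Int × Int)) :
    encode_products_alt line item_dict item_id C1
    = (PySem.List.sorted ((epL line).foldl epStepB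
        ((PySem.Set.empty : PySem.Set Int), PySem.Dict.mk item_dict, item_id, PySem.Dict.mk C1)).1 (fun x => x),
       ((epL line).foldl epStepB
        ((PySem.Set.empty : PySem.Set Int), PySem.Dict.mk item_dict, item_id, PySem.Dict.mk C1)).2.1.items,
       ((epL line).foldl epStepB
        ((PySem.Set.empty : PySem.Set Int), PySem.Dict.mk item_dict, item_id, PySem.Dict.mk C1)).2.2.1,
       ((epL line).foldl epStepB
        ((PySem.Set.empty : PySem.Set Int), PySem.Dict.mk item_dict, item_id, PySem.Dict.mk C1)).2.2.2.items) := by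
  have hcounter : (epItems line).foldl epCountStep PySem.Dict.empty
      = PySem.Dict.counter (epItems line) := rfl
  have hnd : ((epL line).map Prod.fst).Nodup := by
    rw [epL_fst]; exact PySem.Set.nodup_ofList _
  have hbr := epBridge (epL line) hnd (PySem.Set.empty : PySem.Set Int)
    (PySem.Dict.mk item_dict) item_id (PySem.Dict.mk C1)
  have hkeys : (PySem.Dict.counter (epItems line)).keys = (epL line).map Prod.fst := by
    rw [PySem.Dict.keys_counter, epL_fst]
  have hitems : (PySem.Dict.counter (epItems line)).items = epL line :=
    PySem.Dict.items_counter (epItems line)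
  show (PySem.List.sorted (PySem.Set.ofList
        (((epItems line).foldl epCountStep PySem.Dict.empty).keys.map
          (fun el => (epAsg (PySem.Dict.mk item_dict, item_id)
            (((epItems line).foldl epCountStep PySem.Dict.empty).keys.filter
              (fun el => !((PySem.Dict.mk item_dict).contains el)))).1.getD el 0))) (fun x => x),
      (epAsg (PySem.Dict.mk item_dict, item_id)
        (((epItems line).foldl epCountStep PySem.Dict.empty).keys.filter
          (fun el => !((PySem.Dict.mk item_dict).contains el)))).1.items,
      (epAsg (PySem.Dict.mk item_dict, item_id)
        (((epItems line).foldl epCountStep PySem.Dict.empty).keys.filter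
          (fun el => !((PySem.Dict.mk item_dict).contains el)))).2,
      (((epItems line).foldl epCountStep PySem.Dict.empty).items.foldl
        (epBStep (epAsg (PySem.Dict.mk item_dict, item_id)
          (((epItems line).foldl epCountStep PySem.Dict.empty).keys.filter
            (fun el => !((PySem.Dict.mk item_dict).contains el)))).1
          (PySem.Set.ofList (((epItems line).foldl epCountStep PySem.Dict.empty).keys.filter
            (fun el => !((PySem.Dict.mk item_dict).contains el)))))
        (PySem.Dict.mk C1)).items) = _
  have hNLdef : ((epL line).map Prod.fst).filter (fun el => !((PySem.Dict.mk item_dict).contains el))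
      = epNewL (PySem.Dict.mk item_dict) (epL line) := rfl
  have hbk : PySem.Set.ofList (((epL line).map Prod.fst).map
        (fun el => (epAsg (PySem.Dict.mk item_dict, item_id)
          (epNewL (PySem.Dict.mk item_dict) (epL line))).1.getD el 0))
      = (epL line).foldl (fun bb p => bb.add ((epAsg (PySem.Dict.mk item_dict, item_id)
          (epNewL (PySem.Dict.mk item_dict) (epL line))).1.getD p.1 0))
        (PySem.Set.empty : PySem.Set Int) := by
    rw [PySem.Set.ofList_eq_foldl, List.map_map, List.foldl_map]
    rfl
  rw [hcounter, hkeys, hitems, hNLdef, hbr, hbk]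

-- ===== VERDICT (by name: the statement is the Claim_ definition above) =====
theorem encode_products_spec : Claim_equal_encode_products := by
  unfold Claim_equal_encode_products
  intro line item_dict item_id C1 _ hpre
  unfold Spec_encode_products
  rw [epA_eq, epB_canon]
  have hgood : epGood ((PySem.Set.empty : PySem.Set Int), PySem.Dict.mk item_dict, item_id,
      PySem.Dict.mk C1) (epItems line) := by
    intro el hel v hv
    obtain ⟨h1, h2⟩ := hpre el hel v hv
    exact ⟨(PySem.Dict.contains_iff_mem_keys _ _).mpr h1, h2⟩
  obtain ⟨hb, h2⟩ := epMain (epItems line).length (epItems line) le_rfl _ hgood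
  have hnodB := epNodupB (epL line)
    ((PySem.Set.empty : PySem.Set Int), PySem.Dict.mk item_dict, item_id, PySem.Dict.mk C1)
    List.nodup_nil
  have hL : ((PySem.Set.ofList (epItems line)).map
      (fun k => (k, ((epItems line).count k : Int)))) = epL line := rfl
  rw [hL] at hb h2
  rw [← h2]
  exact congrArg
    (fun z => (z,
      ((epItems line).foldl epStepA
        ((PySem.Set.empty : PySem.Set Int), PySem.Dict.mk item_dict, item_id, PySem.Dict.mk C1)).2.1.items,
      ((epItems line).foldl epStepA
        ((PySem.Set.empty : PySem.Set Int), PySem.Dict.mk item_dict, item_id, PySem.Dict.mk C1)).2.2.1,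
      ((epItems line).foldl epStepA
        ((PySem.Set.empty : PySem.Set Int), PySem.Dict.mk item_dict, item_id, PySem.Dict.mk C1)).2.2.2.items))
    (epSorted_eq hb hnodB)
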